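-- pv_equiv track=rewrite | github.com/00jup/Bioinformatics-class | bioaligner.py | _expand_to_master
-- ===== SOURCE A (Python) =====
-- def _expand_to_master(center_aln, other_aln, max_gaps, orig_len):
--     """Expand other_aln to fit the master (merged-gap) alignment."""
--     insert_before = []  # insertions before each center residue
--     match_char    = []
--     current_ins   = []
--
--     for cc, oc in zip(center_aln, other_aln):
--         if cc == '-':
--             current_ins.append(oc)
--         else:
--             insert_before.append(current_ins[:])
--             match_char.append(oc)
--             current_ins = []
--     insert_after = current_ins
--
--     result = []
--     for j in range(orig_len):
--         ins    = insert_before[j] if j < len(insert_before) else []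
--         result.extend(ins)
--         result.extend(['-'] * (max_gaps[j] - len(ins)))
--         result.append(match_char[j] if j < len(match_char) else '-')
--
--     result.extend(insert_after)
--     result.extend(['-'] * (max_gaps[orig_len] - len(insert_after)))
--     return ''.join(result)
-- ===== SOURCE B (Python) =====
-- def _expand_to_master(center_aln, other_aln, max_gaps, orig_len):
--     """Fused streaming expansion: emit each padded residue block as its column
--     arrives, instead of collecting per-residue lists and rendering them in a
--     second indexed pass."""
--     out = []
--     buf = ''
--     j = 0
--     for cc, oc in zip(center_aln, other_aln):
--         if cc == '-':
--             buf += oc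
--         elif j < orig_len:
--             out.append(buf + '-' * (max_gaps[j] - len(buf)) + oc)
--             buf = ''
--             j += 1
--         else:
--             buf = ''
--     out.append(''.join('-' * max_gaps[k] + '-' for k in range(j, orig_len)))
--     out.append(buf + '-' * (max_gaps[orig_len] - len(buf)))
--     return ''.join(out)
-- ===== Notes on version B (the rewrite author's own statement) =====
-- stated objective: alternative
-- what changed: A collects per-residue insertion lists and match characters in one pass and then renders them in a second indexed pass over range(orig_len); B is a single fused streaming pass that emits each padded residue block as soon as its residue column arrives, keeping only a pending-gap buffer and a residue counter, with a joined comprehension for missing trailing residue columns; its Lean port is direct structural recursion rather than A's folds.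
import Mathlib
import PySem

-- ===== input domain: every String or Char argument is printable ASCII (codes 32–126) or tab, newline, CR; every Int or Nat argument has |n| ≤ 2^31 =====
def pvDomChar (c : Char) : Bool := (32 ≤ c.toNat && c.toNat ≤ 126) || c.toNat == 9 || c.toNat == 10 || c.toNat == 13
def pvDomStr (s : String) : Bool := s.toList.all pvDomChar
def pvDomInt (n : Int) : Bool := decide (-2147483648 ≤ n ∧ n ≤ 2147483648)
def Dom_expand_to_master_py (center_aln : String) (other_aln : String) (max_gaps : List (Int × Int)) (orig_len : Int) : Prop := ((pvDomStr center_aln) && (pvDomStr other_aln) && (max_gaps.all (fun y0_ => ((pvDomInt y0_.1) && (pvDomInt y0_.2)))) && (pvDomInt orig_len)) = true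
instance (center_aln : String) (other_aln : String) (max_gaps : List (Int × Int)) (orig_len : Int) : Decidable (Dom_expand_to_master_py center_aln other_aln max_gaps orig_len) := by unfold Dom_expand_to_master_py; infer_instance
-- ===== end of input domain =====

-- B replaces A's collect-then-render two-phase layout by a single fused streaming pass
-- (same cost, different decomposition); its port is structural recursion, not A's folds.

-- '-' * n for a Python int n (negative repeat count gives the empty string)
def pvPad (n : Int) : List Char := List.replicate n.toNat '-'

-- ===== PORT A =====
def expand_to_master_py (center_aln : String) (other_aln : String) (max_gaps : List (Int × Int)) (orig_len : Int) : String :=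
  let d := PySem.Dict.mk max_gaps
  let st := (List.zip center_aln.toList other_aln.toList).foldl
    (fun (s : List (List Char) × List Char × List Char) (p : Char × Char) =>
      if p.1 = '-' then (s.1, s.2.1, s.2.2 ++ [p.2])
      else (s.1 ++ [s.2.2], s.2.1 ++ [p.2], ([] : List Char)))
    ([], [], [])
  let insert_before := st.1
  let match_char := st.2.1
  let insert_after := st.2.2
  let result := (PySem.List.pyRange 0 orig_len 1).foldl
    (fun (r : List Char) (j : Int) =>
      let ins := if j < (insert_before.length : Int) then (PySem.List.pyGet? insert_before j).getD [] else []
      r ++ ins ++ pvPad (d.getD j 0 - (ins.length : Int)) ++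
        [if j < (match_char.length : Int) then (PySem.List.pyGet? match_char j).getD '-' else '-'])
    []
  String.ofList (result ++ insert_after ++ pvPad (d.getD orig_len 0 - (insert_after.length : Int)))

-- ===== PORT B =====
-- B's main loop as structural recursion over the zipped columns; the joined
-- comprehension over range(j, orig_len) and the final padded tail are the base case.
def altGo (g : Int → Int) (N : Int) : List (Char × Char) → List Char → Int → List Char
  | [], buf, j =>
    (PySem.List.pyRange j N 1).flatMap (fun k => pvPad (g k) ++ ['-'])
      ++ buf ++ pvPad (g N - (buf.length : Int))
  | (cc, oc) :: rest, buf, j =>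
    if cc = '-' then altGo g N rest (buf ++ [oc]) j
    else if j < N then
      buf ++ pvPad (g j - (buf.length : Int)) ++ [oc] ++ altGo g N rest [] (j + 1)
    else altGo g N rest [] j

def expand_to_master_py_alt (center_aln : String) (other_aln : String) (max_gaps : List (Int × Int)) (orig_len : Int) : String :=
  String.ofList (altGo (fun j => (PySem.Dict.mk max_gaps).getD j 0) orig_len
    (List.zip center_aln.toList other_aln.toList) [] 0)

-- ===== PRECONDITION & SPEC =====
-- Pre_ excludes exactly the inputs on which Python A raises KeyError: some key j in
-- range(orig_len) or the key orig_len is missing from max_gaps.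
def Pre_expand_to_master_py (center_aln : String) (other_aln : String) (max_gaps : List (Int × Int)) (orig_len : Int) : Prop :=
  ((PySem.Dict.mk max_gaps).get? orig_len).isSome = true ∧
  orig_len ≤ (((PySem.List.dedup (max_gaps.map Prod.fst)).filter
      (fun k => decide (0 ≤ k) && decide (k < orig_len))).length : Int)
instance (center_aln : String) (other_aln : String) (max_gaps : List (Int × Int)) (orig_len : Int) : Decidable (Pre_expand_to_master_py center_aln other_aln max_gaps orig_len) := by unfold Pre_expand_to_master_py; infer_instance

def pvWitness_expand_to_master_py : String × String × (List (Int × Int)) × Int :=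
  ("A-B", "CDE", [(0, 1), (1, 0), (2, 0)], 2)

def Spec_expand_to_master_py (center_aln : String) (other_aln : String) (max_gaps : List (Int × Int)) (orig_len : Int) (out : String) : Prop := out = expand_to_master_py_alt center_aln other_aln max_gaps orig_len
instance (center_aln : String) (other_aln : String) (max_gaps : List (Int × Int)) (orig_len : Int) (out : String) : Decidable (Spec_expand_to_master_py center_aln other_aln max_gaps orig_len out) := by unfold Spec_expand_to_master_py; infer_instance

-- ===== CLAIM (what is proved, stated in full; the proofs are below) =====
def Claim_equal_expand_to_master_py : Prop := ∀ (center_aln : String) (other_aln : String) (max_gaps : List (Int × Int)) (orig_len : Int), Dom_expand_to_master_py center_aln other_aln max_gaps orig_len → Pre_expand_to_master_py center_aln other_aln max_gaps orig_len → Spec_expand_to_master_py center_aln other_aln max_gaps orig_len (expand_to_master_py center_aln other_aln max_gaps orig_len)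

-- ===== LEMMAS AND PROOFS =====

-- A's first loop, rewritten as structural recursion from the front.
def pvProcA : List (Char × Char) → List Char → (List (List Char) × List Char × List Char)
  | [], cur => ([], [], cur)
  | p :: ps, cur =>
    if p.1 = '-' then pvProcA ps (cur ++ [p.2])
    else
      let r := pvProcA ps []
      (cur :: r.1, p.2 :: r.2.1, r.2.2)

lemma pvFoldA_eq (ps : List (Char × Char)) (ib0 : List (List Char)) (mc0 cur : List Char) :
    ps.foldl
      (fun (s : List (List Char) × List Char × List Char) (p : Char × Char) =>
        if p.1 = '-' then (s.1, s.2.1, s.2.2 ++ [p.2])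
        else (s.1 ++ [s.2.2], s.2.1 ++ [p.2], ([] : List Char)))
      (ib0, mc0, cur)
    = (ib0 ++ (pvProcA ps cur).1, mc0 ++ (pvProcA ps cur).2.1, (pvProcA ps cur).2.2) := by
  induction ps generalizing ib0 mc0 cur with
  | nil => simp [pvProcA]
  | cons p ps ih =>
    by_cases h : p.1 = '-'
    · simp [pvProcA, h, List.foldl_cons, ih]
    · simp [pvProcA, h, List.foldl_cons, ih]

-- A's render loop, as recursion consuming the two lists from the front.
def pvRenderA (g : Int → Int) (N : Int) (ib : List (List Char)) (mc : List Char) (j : Int) : List Char :=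
  if _h : j < N then
    ib.headD [] ++ pvPad (g j - ((ib.headD []).length : Int)) ++ [mc.headD '-'] ++
      pvRenderA g N ib.tail mc.tail (j + 1)
  else []
termination_by (N - j).toNat
decreasing_by omega

lemma pvRenderA_of_not_lt (g : Int → Int) (N : Int) (ib : List (List Char)) (mc : List Char) (j : Int)
    (h : ¬ j < N) : pvRenderA g N ib mc j = [] := by
  rw [pvRenderA]; simp [h]

lemma pvRenderA_nil (g : Int → Int) (N : Int) :
    ∀ (n : Nat) (j : Int), (N - j).toNat = n →
    pvRenderA g N [] [] j = (PySem.List.pyRange j N 1).flatMap (fun k => pvPad (g k) ++ ['-']) := by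
  intro n
  induction n with
  | zero =>
    intro j hn
    have hj : ¬ j < N := by omega
    rw [pvRenderA_of_not_lt g N [] [] j hj, PySem.List.pyRange_one_eq_nil (by omega)]
    simp
  | succ n ih =>
    intro j hn
    by_cases h : j < N
    · rw [pvRenderA, PySem.List.pyRange_one_cons h]
      simp only [List.flatMap_cons, dif_pos h, List.headD_nil, List.tail_nil,
        List.length_nil, Int.natCast_zero, sub_zero, List.nil_append]
      rw [ih (j + 1) (by omega)]
    · rw [pvRenderA_of_not_lt g N [] [] j h, PySem.List.pyRange_one_eq_nil (by omega)]
      simp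

-- the central equivalence: rendering A's collected lists = B's fused recursion
lemma pvMain (g : Int → Int) (N : Int) (ps : List (Char × Char)) :
    ∀ (cur : List Char) (j : Int),
    pvRenderA g N (pvProcA ps cur).1 (pvProcA ps cur).2.1 j ++ (pvProcA ps cur).2.2
      ++ pvPad (g N - ((pvProcA ps cur).2.2.length : Int))
    = altGo g N ps cur j := by
  induction ps with
  | nil =>
    intro cur j
    simp only [pvProcA, altGo]
    rw [pvRenderA_nil g N (N - j).toNat j rfl]
  | cons p ps ih =>
    intro cur j
    obtain ⟨cc, oc⟩ := p
    by_cases h : cc = '-'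
    · simp only [pvProcA, altGo, h, if_true]
      exact ih (cur ++ [oc]) j
    · by_cases hj : j < N
      · simp only [pvProcA, altGo, h, if_false, if_pos hj]
        rw [pvRenderA]
        simp only [dif_pos hj, List.headD_cons, List.tail_cons]
        rw [← ih [] (j + 1)]
        simp [List.append_assoc]
      · simp only [pvProcA, altGo, h, if_false, if_neg hj]
        rw [pvRenderA_of_not_lt g N _ _ j hj]
        rw [← ih [] j, pvRenderA_of_not_lt g N _ _ j hj]

-- A's indexed range loop equals pvRenderA on the dropped lists
lemma pvRangeA_eq (g : Int → Int) (N : Int) (ib : List (List Char)) (mc : List Char) :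
    ∀ (n : Nat) (j : Int) (acc : List Char), 0 ≤ j → (N - j).toNat = n →
    (PySem.List.pyRange j N 1).foldl
      (fun (r : List Char) (i : Int) =>
        let ins := if i < (ib.length : Int) then (PySem.List.pyGet? ib i).getD [] else []
        r ++ ins ++ pvPad (g i - (ins.length : Int)) ++
          [if i < (mc.length : Int) then (PySem.List.pyGet? mc i).getD '-' else '-'])
      acc
    = acc ++ pvRenderA g N (ib.drop j.toNat) (mc.drop j.toNat) j := by
  intro n
  induction n with
  | zero =>
    intro j acc hj hn
    have h : ¬ j < N := by omega
    rw [PySem.List.pyRange_one_eq_nil (by omega), pvRenderA_of_not_lt g N _ _ j h]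
    simp
  | succ n ih =>
    intro j acc hj hn
    by_cases h : j < N
    · have hins : (if j < (ib.length : Int) then (PySem.List.pyGet? ib j).getD [] else [])
          = (ib.drop j.toNat).headD [] := by
        by_cases hlt : j < (ib.length : Int)
        · rw [if_pos hlt]
          obtain ⟨k, rfl⟩ : ∃ k : Nat, j = (k : Int) := ⟨j.toNat, by omega⟩
          rw [PySem.List.pyGet?_natCast]
          have hk : ((k : Int)).toNat = k := by omega
          rw [hk, List.headD_eq_head?_getD, List.head?_drop]
        · rw [if_neg hlt, List.drop_eq_nil_of_le (by omega), List.headD_nil]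
      have hmc : (if j < (mc.length : Int) then (PySem.List.pyGet? mc j).getD '-' else '-')
          = (mc.drop j.toNat).headD '-' := by
        by_cases hlt : j < (mc.length : Int)
        · rw [if_pos hlt]
          obtain ⟨k, rfl⟩ : ∃ k : Nat, j = (k : Int) := ⟨j.toNat, by omega⟩
          rw [PySem.List.pyGet?_natCast]
          have hk : ((k : Int)).toNat = k := by omega
          rw [hk, List.headD_eq_head?_getD, List.head?_drop]
        · rw [if_neg hlt, List.drop_eq_nil_of_le (by omega), List.headD_nil]
      have hdrop1 : ib.drop (j + 1).toNat = (ib.drop j.toNat).tail := by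
        rw [List.tail_drop]; congr 1; omega
      have hdrop2 : mc.drop (j + 1).toNat = (mc.drop j.toNat).tail := by
        rw [List.tail_drop]; congr 1; omega
      rw [PySem.List.pyRange_one_cons h, List.foldl_cons,
        ih (j + 1) _ (by omega) (by omega)]
      conv_rhs => rw [pvRenderA]
      rw [dif_pos h]
      simp only [hins, hmc, hdrop1, hdrop2]
      simp [List.append_assoc]
    · rw [PySem.List.pyRange_one_eq_nil (by omega), pvRenderA_of_not_lt g N _ _ j h]
      simp

-- ===== VERDICT (by name: the statement is the Claim_ definition above) =====
theorem expand_to_master_py_spec : Claim_equal_expand_to_master_py := by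
  intro center_aln other_aln max_gaps orig_len _hDom _hPre
  unfold Spec_expand_to_master_py expand_to_master_py expand_to_master_py_alt
  simp only []
  set g : Int → Int := fun j => (PySem.Dict.mk max_gaps).getD j 0 with hg
  set ps := List.zip center_aln.toList other_aln.toList with hps
  rw [pvFoldA_eq ps [] [] []]
  rw [pvRangeA_eq g orig_len _ _ (orig_len - 0).toNat 0 [] (by omega) rfl]
  simp only [Int.toNat_zero, List.drop_zero, List.nil_append]
  rw [← pvMain g orig_len ps [] 0]
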